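-- pv_equiv track=rewrite | github.com/zhou-ray/mta-congestion | backfill.py | generate_month_ranges
-- ===== SOURCE A (Python) =====
-- def generate_month_ranges(start_year: int, end_year: int) -> list[tuple]:
--     ranges = []
--     for year in range(start_year, end_year + 1):
--         for month in range(1, 13):
--             if month == 12:
--                 next_year = year + 1
--                 next_month = 1
--             else:
--                 next_year = year
--                 next_month = month + 1
--
--             start = f"{year}-{month:02d}-01T00:00:00"
--             end = f"{next_year}-{next_month:02d}-01T00:00:00"
--             ranges.append((start, end))
--     return ranges
-- ===== SOURCE B (Python) =====
-- def generate_month_ranges(start_year: int, end_year: int) -> list[tuple]: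
--     bounds = [
--         f"{year}-{month:02d}-01T00:00:00"
--         for year in range(start_year, end_year + 1)
--         for month in range(1, 13)
--     ]
--     bounds.append(f"{end_year + 1}-01-01T00:00:00")
--     return list(zip(bounds, bounds[1:]))
-- ===== Notes on version B (the rewrite author's own statement) =====
-- stated objective: alternative
-- what changed: B builds one flat list of month-boundary timestamps (plus a single trailing boundary) and pairs consecutive boundaries with zip, eliminating A's month==12 next-year/next-month branch and the per-month construction of two strings.
import Mathlib
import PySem

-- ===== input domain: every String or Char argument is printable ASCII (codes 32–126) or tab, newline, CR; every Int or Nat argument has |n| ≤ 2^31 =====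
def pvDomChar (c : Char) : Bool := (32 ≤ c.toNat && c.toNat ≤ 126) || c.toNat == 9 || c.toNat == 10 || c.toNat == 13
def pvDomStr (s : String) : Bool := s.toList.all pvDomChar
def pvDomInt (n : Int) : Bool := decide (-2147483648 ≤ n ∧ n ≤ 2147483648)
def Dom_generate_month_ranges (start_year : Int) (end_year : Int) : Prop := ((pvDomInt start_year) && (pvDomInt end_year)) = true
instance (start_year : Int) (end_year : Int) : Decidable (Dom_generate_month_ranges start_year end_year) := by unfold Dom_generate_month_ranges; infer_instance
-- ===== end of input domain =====

-- B replaces A's per-month branch logic by a flat list of month boundaries zipped with its own tail; same cost, plainer structure.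

-- shared helper: the f-string f"{y}-{m:02d}-01T00:00:00" (identical in both Pythons);
-- exact for the month values 1..12 that ever occur (zero-pad a nonneg number to width 2)
def pvStamp (y : Int) (m : Int) : String :=
  String.ofList (PySem.Int.toChars y ++ ['-'] ++
    (let cs := PySem.Int.toChars m; if cs.length < 2 then '0' :: cs else cs) ++
    ['-', '0', '1', 'T', '0', '0', ':', '0', '0', ':', '0', '0'])

-- ===== PORT A =====
def generate_month_ranges (start_year : Int) (end_year : Int) : List (String × String) :=
  (PySem.List.pyRange start_year (end_year + 1) 1).foldl (fun ranges year =>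
    (PySem.List.pyRange 1 13 1).foldl (fun ranges month =>
      let p : Int × Int := if month == 12 then (year + 1, 1) else (year, month + 1)
      let start := pvStamp year month
      let «end» := pvStamp p.1 p.2
      ranges ++ [(start, «end»)]) ranges) []

-- ===== PORT B =====
def generate_month_ranges_alt (start_year : Int) (end_year : Int) : List (String × String) :=
  let bounds :=
    ((PySem.List.pyRange start_year (end_year + 1) 1).flatMap (fun year =>
      (PySem.List.pyRange 1 13 1).map (fun month => pvStamp year month)))
    ++ [pvStamp (end_year + 1) 1]
  List.zip bounds bounds.tail

-- ===== PRECONDITION & SPEC =====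
def Spec_generate_month_ranges (start_year : Int) (end_year : Int) (out : List (String × String)) : Prop := out = generate_month_ranges_alt start_year end_year
instance (start_year : Int) (end_year : Int) (out : List (String × String)) : Decidable (Spec_generate_month_ranges start_year end_year out) := by unfold Spec_generate_month_ranges; infer_instance

-- ===== CLAIM (what is proved, stated in full; the proofs are below) =====
def Claim_equal_generate_month_ranges : Prop := ∀ (start_year : Int) (end_year : Int), Dom_generate_month_ranges start_year end_year → Spec_generate_month_ranges start_year end_year (generate_month_ranges start_year end_year)

-- ===== LEMMAS AND PROOFS =====

-- A's 12 pairs for one year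
def pvBlockA (y : Int) : List (String × String) :=
  [(pvStamp y 1, pvStamp y 2), (pvStamp y 2, pvStamp y 3), (pvStamp y 3, pvStamp y 4),
   (pvStamp y 4, pvStamp y 5), (pvStamp y 5, pvStamp y 6), (pvStamp y 6, pvStamp y 7),
   (pvStamp y 7, pvStamp y 8), (pvStamp y 8, pvStamp y 9), (pvStamp y 9, pvStamp y 10),
   (pvStamp y 10, pvStamp y 11), (pvStamp y 11, pvStamp y 12), (pvStamp y 12, pvStamp (y + 1) 1)]

-- B's 12 boundary strings for one year
def pvBlockB (y : Int) : List String :=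
  [pvStamp y 1, pvStamp y 2, pvStamp y 3, pvStamp y 4, pvStamp y 5, pvStamp y 6,
   pvStamp y 7, pvStamp y 8, pvStamp y 9, pvStamp y 10, pvStamp y 11, pvStamp y 12]

lemma pvMonths : PySem.List.pyRange 1 13 1 = [1,2,3,4,5,6,7,8,9,10,11,12] := by decide

lemma pvInnerA (acc : List (String × String)) (y : Int) :
    (PySem.List.pyRange 1 13 1).foldl (fun ranges month =>
      let p : Int × Int := if month == 12 then (y + 1, 1) else (y, month + 1)
      let start := pvStamp y month
      let «end» := pvStamp p.1 p.2
      ranges ++ [(start, «end»)]) acc = acc ++ pvBlockA y := by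
  rw [pvMonths]
  simp [List.foldl, pvBlockA]

lemma pvInnerB (y : Int) :
    (PySem.List.pyRange 1 13 1).map (fun month => pvStamp y month) = pvBlockB y := by
  rw [pvMonths]; rfl

lemma pvA_flatMap (s e : Int) :
    generate_month_ranges s e = (PySem.List.pyRange s (e + 1) 1).flatMap pvBlockA := by
  unfold generate_month_ranges
  have h : ∀ (acc : List (String × String)),
      (PySem.List.pyRange s (e + 1) 1).foldl (fun ranges year =>
        (PySem.List.pyRange 1 13 1).foldl (fun ranges month =>
          let p : Int × Int := if month == 12 then (year + 1, 1) else (year, month + 1)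
          let start := pvStamp year month
          let «end» := pvStamp p.1 p.2
          ranges ++ [(start, «end»)]) ranges) acc
      = acc ++ (PySem.List.pyRange s (e + 1) 1).flatMap pvBlockA := by
    intro acc
    calc (PySem.List.pyRange s (e + 1) 1).foldl _ acc
        = (PySem.List.pyRange s (e + 1) 1).foldl (fun ranges year => ranges ++ pvBlockA year) acc := by
          exact PySem.List.foldl_congr_mem _ _ _ acc (fun a x _ => pvInnerA a x)
      _ = acc ++ (PySem.List.pyRange s (e + 1) 1).flatMap pvBlockA :=
          PySem.List.foldl_append_eq_flatMap pvBlockA _ acc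
  simpa using h []

lemma pvHead (n : Nat) (a : Int) :
    ∃ r, (PySem.List.pyRange a (a + n) 1).flatMap pvBlockB ++ [pvStamp (a + n) 1]
        = pvStamp a 1 :: r := by
  cases n with
  | zero =>
      refine ⟨[], ?_⟩
      simp
  | succ m =>
      rw [PySem.List.pyRange_one_cons (by push_cast; omega : a < a + ((m:Nat)+1 : Nat))]
      simp only [List.flatMap_cons, List.append_assoc, pvBlockB, List.cons_append]
      exact ⟨_, rfl⟩

lemma pvKey (n : Nat) : ∀ (a : Int),
    (PySem.List.pyRange a (a + n) 1).flatMap pvBlockA =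
    (let L := (PySem.List.pyRange a (a + n) 1).flatMap pvBlockB ++ [pvStamp (a + n) 1];
     List.zip L L.tail) := by
  induction n with
  | zero =>
      intro a
      simp
  | succ m ih =>
      intro a
      have hlt : a < a + ((m:Nat)+1 : Nat) := by push_cast; omega
      rw [PySem.List.pyRange_one_cons hlt]
      have hshift : a + ((m : Int) + 1) = (a + 1) + (m : Int) := by ring
      obtain ⟨r, hr⟩ := pvHead m (a + 1)
      have ihm := ih (a + 1)
      simp only [hr, List.tail_cons] at ihm
      simp only [List.flatMap_cons, List.append_assoc]
      push_cast
      rw [hshift, hr, ihm]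
      simp [pvBlockA, pvBlockB, List.zip]

-- ===== VERDICT (by name: the statement is the Claim_ definition above) =====
theorem generate_month_ranges_spec : Claim_equal_generate_month_ranges := by
  intro s e _
  show generate_month_ranges s e = generate_month_ranges_alt s e
  unfold generate_month_ranges_alt
  rw [pvA_flatMap]
  have hB : (fun year => (PySem.List.pyRange 1 13 1).map (fun month => pvStamp year month)) = pvBlockB := by
    funext y; exact pvInnerB y
  rw [hB]
  by_cases h : s ≤ e + 1
  · have hn : e + 1 = s + ((e + 1 - s).toNat : Int) := by omega
    rw [hn]
    exact pvKey (e + 1 - s).toNat s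
  · have : PySem.List.pyRange s (e + 1) 1 = [] := by
      simp [PySem.List.pyRange]; omega
    rw [this]
    simp
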